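-- pv_equiv track=rewrite | github.com/SavageDud/Crypto_coin_demo | Django_web_app/crypto_demo/crypto_demo/ServerFunctions.py | XSS_Sanitize
-- ===== SOURCE A (Python) =====
-- def XSS_Sanitize(string_):
--     dangerouse_chars = {">" : "tri",
--                         "<" : "retri",
--                         "'" : "qht",
--                         '"' : "dqht"}
--     new_str =""
--     for x in string_:
--         if(x in dangerouse_chars.keys()):
--             new_str+= dangerouse_chars[x]
--         else:
--             new_str+= x
--     return new_str
-- ===== SOURCE B (Python) =====
-- def XSS_Sanitize(string_):
--     return (string_.replace(">", "tri")
--                    .replace("<", "retri")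
--                    .replace("'", "qht")
--                    .replace('"', "dqht"))
-- ===== Notes on version B (the rewrite author's own statement) =====
-- stated objective: idiomatic
-- what changed: Replaces the character-by-character loop with a dict lookup per character by a chain of four whole-string str.replace calls (one C-level scan per escape pair); safe because no escape string contains a dangerous character.
import Mathlib
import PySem

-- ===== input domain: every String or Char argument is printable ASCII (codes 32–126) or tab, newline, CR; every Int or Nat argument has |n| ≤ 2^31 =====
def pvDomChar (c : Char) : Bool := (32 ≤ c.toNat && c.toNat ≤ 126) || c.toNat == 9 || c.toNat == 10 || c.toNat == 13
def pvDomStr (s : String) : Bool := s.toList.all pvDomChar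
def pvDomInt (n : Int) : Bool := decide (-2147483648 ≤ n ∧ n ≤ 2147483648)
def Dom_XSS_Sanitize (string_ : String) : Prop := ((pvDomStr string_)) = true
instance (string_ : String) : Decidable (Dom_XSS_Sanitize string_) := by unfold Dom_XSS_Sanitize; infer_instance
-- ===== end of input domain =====

-- B replaces A's per-character loop with a dict lookup by a chain of four whole-string
-- str.replace calls (idiomatic); same return value on every input.

-- ===== PORT A =====
-- A: dict of dangerous chars, then one pass over the characters, appending either the
-- escape string or the character itself.  (The loop characters are Python length-1
-- strings; ported as a Char-keyed PySem.Dict.)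
def XSS_Sanitize (string_ : String) : String :=
  let dangerouse_chars : PySem.Dict Char String :=
    ((((PySem.Dict.empty).insert '>' "tri").insert '<' "retri").insert '\'' "qht").insert '"' "dqht"
  let new_str : List Char :=
    string_.toList.foldl
      (fun acc x =>
        if dangerouse_chars.contains x then acc ++ (dangerouse_chars.getD x "").toList
        else acc ++ [x]) []
  String.ofList new_str

-- ===== PORT B =====
def XSS_Sanitize_alt (string_ : String) : String :=
  PySem.Str.replace
    (PySem.Str.replace
      (PySem.Str.replace
        (PySem.Str.replace string_ ">" "tri") "<" "retri") "'" "qht") "\"" "dqht"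

-- ===== PRECONDITION & SPEC =====
def Spec_XSS_Sanitize (string_ : String) (out : String) : Prop := out = XSS_Sanitize_alt string_
instance (string_ : String) (out : String) : Decidable (Spec_XSS_Sanitize string_ out) := by unfold Spec_XSS_Sanitize; infer_instance

-- ===== CLAIM (what is proved, stated in full; the proofs are below) =====
def Claim_equal_XSS_Sanitize : Prop := ∀ (string_ : String), Dom_XSS_Sanitize string_ → Spec_XSS_Sanitize string_ (XSS_Sanitize string_)

-- ===== LEMMAS AND PROOFS =====

-- replace with a single-character pattern is a per-character substitution
theorem replace_go_single (c : Char) (new : List Char) :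
    ∀ (cs : List Char) (fuel : Nat) (acc : List Char), cs.length ≤ fuel →
      PySem.Chars.replace.go [c] new fuel cs acc
        = acc.reverse ++ cs.flatMap (fun x => if x = c then new else [x])
  | [], fuel, acc, _ => by cases fuel <;> simp [PySem.Chars.replace.go]
  | x :: t, fuel + 1, acc, h => by
      simp only [PySem.Chars.replace.go]
      by_cases hx : x = c
      · subst hx
        have hp : List.isPrefixOf [x] (x :: t) = true := by simp [List.isPrefixOf]
        rw [hp]
        simp [replace_go_single x new t fuel (new.reverse ++ acc) (by simpa using h)]
      · have hp : List.isPrefixOf [c] (x :: t) = false := by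
          simp [List.isPrefixOf]; exact fun h => absurd h.symm hx
        rw [hp]
        simp [replace_go_single c new t fuel (x :: acc) (by simpa using h), hx]

theorem replace_single (cs : List Char) (c : Char) (new : List Char) :
    PySem.Chars.replace cs [c] new = cs.flatMap (fun x => if x = c then new else [x]) := by
  have := replace_go_single c new cs cs.length [] cs.length.le_refl
  simpa [PySem.Chars.replace] using this

-- the per-character substitution both programs amount to
def pvSub (x : Char) : List Char :=
  if x = '>' then "tri".toList
  else if x = '<' then "retri".toList
  else if x = '\'' then "qht".toList
  else if x = '"' then "dqht".toList
  else [x]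

theorem altToList (s : String) :
    (XSS_Sanitize_alt s).toList = s.toList.flatMap pvSub := by
  have h1 : (">" : String).toList = ['>'] := rfl
  have h2 : ("<" : String).toList = ['<'] := rfl
  have h3 : ("'" : String).toList = ['\''] := rfl
  have h4 : ("\"" : String).toList = ['"'] := rfl
  simp only [XSS_Sanitize_alt, PySem.Str.toList_replace, h1, h2, h3, h4, replace_single,
    List.flatMap_assoc]
  refine List.flatMap_congr (fun x _ => ?_)
  by_cases h1 : x = '>' <;> by_cases h2 : x = '<' <;> by_cases h3 : x = '\'' <;>
    by_cases h4 : x = '"' <;> simp_all [pvSub]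

theorem aToList (s : String) :
    (XSS_Sanitize s).toList = s.toList.flatMap pvSub := by
  simp only [XSS_Sanitize]
  have hbody : (fun (acc : List Char) (x : Char) =>
      if (((((PySem.Dict.empty : PySem.Dict Char String).insert '>' "tri").insert '<' "retri").insert '\'' "qht").insert '"' "dqht").contains x
      then acc ++ ((((((PySem.Dict.empty : PySem.Dict Char String).insert '>' "tri").insert '<' "retri").insert '\'' "qht").insert '"' "dqht").getD x "").toList
      else acc ++ [x])
      = fun (acc : List Char) (x : Char) => acc ++ pvSub x := by
    funext acc x
    simp only [PySem.Dict.contains_insert, PySem.Dict.getD_insert, pvSub]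
    by_cases h1 : x = '>' <;> by_cases h2 : x = '<' <;> by_cases h3 : x = '\'' <;>
      by_cases h4 : x = '"' <;> simp_all
  rw [hbody, PySem.List.foldl_append_eq_flatMap pvSub s.toList []]
  exact Eq.symm (String.ofList_eq.mp rfl)

-- ===== VERDICT (by name: the statement is the Claim_ definition above) =====
theorem XSS_Sanitize_spec : Claim_equal_XSS_Sanitize := by
  intro s _
  unfold Spec_XSS_Sanitize
  exact String.toList_inj.mp ((aToList s).trans (altToList s).symm)
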